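-- pv_equiv track=rewrite | github.com/vHanda/beancount_import_builder | beancount_one_importer/bean_types.py | is_account
-- ===== SOURCE A (Python) =====
-- def is_str(x):
--     return isinstance(x, str) and not is_float(x)
--
-- def to_str(x):
--     return str(x).strip()
--
-- def is_float(x):
--     return to_float(x) != None
--
-- def to_float(x):
--     try:
--         f = float(x)
--         return f
--     except:
--         pass
--
--     for c in x:
--         if not c.isdigit() and c not in [",", "."]:
--             return None
--
--     commas = x.count(",")
--     dots = x.count(".")
--
--     if commas == 1 and dots == 0:
--         try:
--             x_comma = x.replace(",", ".")
--             x_comma_num = float(x_comma)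
--             if x_comma_num != None:
--                 return x_comma_num
--         except:
--             return None
--
--     if commas == 1 and dots == 1:
--         if x.rfind(".") > x.rfind(","):
--             x = x.replace(",", "")
--             try:
--                 f = float(x)
--                 return f
--             except:
--                 pass
--         else:
--             x = x.replace(".", "")
--             x = x.replace(",", ".")
--             try:
--                 f = float(x)
--                 return f
--             except:
--                 pass
--
--     if commas > 1 and dots == 0:
--         x = x.replace(",", "")
--         try:
--             f = float(x)
--             return f
--         except:
--             pass
--
--     if commas == 0 and dots > 1:
--         x = x.replace(".", "")
--         try:
--             f = float(x)
--             return f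
--         except:
--             pass
--
--     try:
--         f = float(x)
--         return f
--     except:
--         return None
--
-- def is_account(x):
--     if not is_str(x):
--         return False
--
--     s = to_str(x)
--     if s == None or s == "":
--         return False
--     if ':' not in s:
--         return False
--
--     words = s.split(':')
--     for w in words:
--         if not w.isalnum():
--             return False
--         if not w[0].isalpha():
--             return False
--
--     return True
-- ===== SOURCE B (Python) =====
-- def is_account(x):
--     # Single left-to-right scan over the stripped string instead of
--     # is_float probing + split(':') + per-word loop.
--     if not isinstance(x, str):
--         return False
--     seen_colon = False
--     seg = 0  # length of the current segment so far
--     for c in x.strip():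
--         if c == ':':
--             if seg == 0:
--                 return False
--             seen_colon = True
--             seg = 0
--         elif seg == 0:
--             if not c.isalpha():
--                 return False
--             seg = 1
--         elif c.isalnum():
--             seg += 1
--         else:
--             return False
--     return seen_colon and seg > 0
-- ===== Notes on version B (the rewrite author's own statement) =====
-- stated objective: simpler
-- what changed: Replaces A's float-parsing probe (is_str/is_float/to_float) plus strip/split/per-word loop with a single left-to-right character scan of the stripped string that tracks the current segment length and whether a separator colon was closed; the float guard is value-irrelevant because no string containing a colon parses as a float.
import Mathlib
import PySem

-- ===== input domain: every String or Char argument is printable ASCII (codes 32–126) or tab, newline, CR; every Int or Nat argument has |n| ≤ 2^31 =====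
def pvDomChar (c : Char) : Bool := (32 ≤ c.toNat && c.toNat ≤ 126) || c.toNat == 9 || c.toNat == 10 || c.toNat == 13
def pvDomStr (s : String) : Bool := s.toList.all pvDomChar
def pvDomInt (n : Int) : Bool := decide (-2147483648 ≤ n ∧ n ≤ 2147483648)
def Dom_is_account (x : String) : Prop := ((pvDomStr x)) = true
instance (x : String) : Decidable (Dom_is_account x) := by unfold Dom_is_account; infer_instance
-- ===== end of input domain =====

-- B replaces A's float-probing (is_str/is_float) + split-on-colon + per-word loop by one left-to-right
-- character scan of the stripped string (objective: simpler single pass; the is_float guard is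
-- value-irrelevant because no string containing a colon parses as a float).

-- ===== PORT A =====
-- PySem has no float type; A only observes WHETHER float(x) succeeds (to_float ≠ None), so the
-- float() calls are ported as a hand-written acceptance test of CPython's float-literal grammar
-- (whitespace strip, optional sign, inf/infinity/nan case-insensitively, or digits with '.' and
-- exponent, underscores only between digits). Exact on the ASCII domain Dom_is_account (validated
-- exhaustively against CPython float() on short ASCII strings).
def pfDigits1 (l : List Char) : Bool := !l.isEmpty && l.all PySem.Chars.isdigit

def pfSignedDigits (l : List Char) : Bool :=
  match l with
  | c :: r => if c == '+' || c == '-' then pfDigits1 r else pfDigits1 (c :: r)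
  | [] => pfDigits1 []

def pfExpPart : List Char → Bool
  | [] => true
  | c :: r => (c == 'e' || c == 'E') && pfSignedDigits r

def pfFrac : List Char → Bool → Bool
  | [], saw => saw
  | c :: r, saw => if PySem.Chars.isdigit c then pfFrac r true else saw && pfExpPart (c :: r)

def pfMant : List Char → Bool → Bool
  | [], saw => saw
  | c :: r, saw =>
    if PySem.Chars.isdigit c then pfMant r true
    else if c == '.' then pfFrac r saw
    else saw && pfExpPart (c :: r)

def pfKw (l : List Char) : Bool :=
  (l.map PySem.Chars.lowerChar == "inf".toList) || (l.map PySem.Chars.lowerChar == "infinity".toList)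
    || (l.map PySem.Chars.lowerChar == "nan".toList)

def pfBody (l : List Char) : Bool := pfKw l || pfMant l false

def pfPlain (l : List Char) : Bool :=
  match l with
  | c :: r => if c == '+' || c == '-' then pfBody r else pfBody (c :: r)
  | [] => pfBody []

-- every '_' must sit between two digits (PEP 515, as float() enforces)
def pfUnderscoreOK : Option Char → List Char → Bool
  | _, [] => true
  | prev, '_' :: r =>
    (match prev with | some p => PySem.Chars.isdigit p | none => false)
      && (match r with | c :: _ => PySem.Chars.isdigit c | [] => false)
      && pfUnderscoreOK (some '_') r
  | _, c :: r => pfUnderscoreOK (some c) r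

-- "float(x) would succeed" (float strips the same whitespace as str.strip on the ASCII domain)
def pyFloatParses (cs : List Char) : Bool :=
  let t := PySem.Chars.strip cs
  pfUnderscoreOK none t && pfPlain (t.filter (fun c => c ≠ '_'))

-- to_float's control flow, tracking only success/failure (all that is_float observes).
-- In each mutated-x branch Python's in-branch 'try: return float(x)' and the final
-- 'try: return float(x)' probe the SAME mutated x, so each branch is one pyFloatParses call.
def is_float_chars (cs : List Char) : Bool :=
  if pyFloatParses cs then true
  else if !(cs.all (fun c => PySem.Chars.isdigit c || c == ',' || c == '.')) then false
  else
    let commas := PySem.Chars.count cs [','];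
    let dots := PySem.Chars.count cs ['.'];
    if commas == 1 && dots == 0 then
      pyFloatParses (PySem.Chars.replace cs [','] ['.'])
    else if commas == 1 && dots == 1 then
      if PySem.Chars.rfind cs ['.'] > PySem.Chars.rfind cs [','] then
        pyFloatParses (PySem.Chars.replace cs [','] [])
      else
        pyFloatParses (PySem.Chars.replace (PySem.Chars.replace cs ['.'] []) [','] ['.'])
    else if commas > 1 && dots == 0 then
      pyFloatParses (PySem.Chars.replace cs [','] [])
    else if commas == 0 && dots > 1 then
      pyFloatParses (PySem.Chars.replace cs ['.'] [])
    else pyFloatParses cs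

-- is_str(x): isinstance(x, str) is always true for a String argument
def is_str (x : String) : Bool := !(is_float_chars x.toList)

-- the for-loop over words (early return False)
def aWords : List (List Char) → Bool
  | [] => true
  | w :: ws =>
    if !(PySem.Chars.strIsalnum w) then false
    else if !(match PySem.List.pyGet? w 0 with
              | some c => PySem.Chars.isalpha c
              | none => false) then false  -- w[0]: none (IndexError) is unreachable, "".isalnum() already returned False
    else aWords ws

def is_account (x : String) : Bool :=
  if !(is_str x) then false
  else
    -- s = to_str(x) = str(x).strip(); 's == None' is never true
    let s := PySem.Chars.strip x.toList
    if s.isEmpty then false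
    else if !(PySem.Chars.isIn [':'] s) then false
    else aWords (PySem.Chars.splitOn s [':'])

-- ===== PORT B =====
-- single scan: seen = a ':' was closed, seg = length of current segment so far
def bScan : List Char → Bool → Nat → Bool
  | [], seen, seg => seen && decide (0 < seg)
  | c :: r, seen, seg =>
    if c == ':' then (if seg == 0 then false else bScan r true 0)
    else if seg == 0 then (if !(PySem.Chars.isalpha c) then false else bScan r seen 1)
    else if PySem.Chars.isalnum c then bScan r seen (seg + 1)
    else false

-- isinstance(x, str) is always true for a String argument
def is_account_alt (x : String) : Bool := bScan (PySem.Chars.strip x.toList) false 0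

-- ===== PRECONDITION & SPEC =====
def Spec_is_account (x : String) (out : Bool) : Prop := out = is_account_alt x
instance (x : String) (out : Bool) : Decidable (Spec_is_account x out) := by unfold Spec_is_account; infer_instance

-- ===== CLAIM (what is proved, stated in full; the proofs are below) =====
def Claim_equal_is_account : Prop := ∀ (x : String), Dom_is_account x → Spec_is_account x (is_account x)

-- ===== LEMMAS AND PROOFS =====

-- ':' survives strip / is never produced by strip
theorem mem_dropWhile_of_mem {α : Type} {p : α → Bool} {c : α} :
    ∀ {l : List α}, c ∈ l → p c = false → c ∈ l.dropWhile p
  | a :: t, h, hs => by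
    rw [List.dropWhile_cons]
    rcases List.mem_cons.mp h with rfl | hm
    · simp [hs]
    · split
      · exact mem_dropWhile_of_mem hm hs
      · exact List.mem_cons_of_mem _ hm

theorem mem_strip_of_mem {c : Char} {l : List Char} (h : c ∈ l) (hs : PySem.Chars.isspace c = false) :
    c ∈ PySem.Chars.strip l := by
  unfold PySem.Chars.strip PySem.Chars.rstrip PySem.Chars.lstrip
  rw [List.mem_reverse]
  exact mem_dropWhile_of_mem (List.mem_reverse.mpr (mem_dropWhile_of_mem h hs)) hs

theorem strip_subset {c : Char} {l : List Char} (h : c ∈ PySem.Chars.strip l) : c ∈ l := by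
  unfold PySem.Chars.strip PySem.Chars.rstrip PySem.Chars.lstrip at h
  rw [List.mem_reverse] at h
  have h1 := (List.dropWhile_sublist _).subset h
  rw [List.mem_reverse] at h1
  exact (List.dropWhile_sublist _).subset h1

-- pyFloatParses rejects any string containing ':'
theorem pfDigits1_colon {l : List Char} (h : ':' ∈ l) : pfDigits1 l = false := by
  unfold pfDigits1
  have : l.all PySem.Chars.isdigit = false := List.all_eq_false.mpr ⟨':', h, by decide⟩
  simp [this]

theorem pfSignedDigits_colon {l : List Char} (h : ':' ∈ l) : pfSignedDigits l = false := by
  match l with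
  | c :: r =>
    unfold pfSignedDigits
    by_cases hc : (c == '+' || c == '-') = true
    · rcases List.mem_cons.mp h with rfl | hm
      · simp at hc
      · simp [hc, pfDigits1_colon hm]
    · simp only [Bool.not_eq_true] at hc
      simp [hc, pfDigits1_colon h]

theorem pfExpPart_colon {l : List Char} (h : ':' ∈ l) : pfExpPart l = false := by
  match l with
  | c :: r =>
    rcases List.mem_cons.mp h with rfl | hm
    · simp [pfExpPart]
    · simp [pfExpPart, pfSignedDigits_colon hm]

theorem pfFrac_colon {l : List Char} (h : ':' ∈ l) : ∀ saw, pfFrac l saw = false := by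
  induction l with
  | nil => simp at h
  | cons c r ih =>
    intro saw
    unfold pfFrac
    rcases List.mem_cons.mp h with rfl | hm
    · simp [pfExpPart_colon h, show PySem.Chars.isdigit ':' = false by decide]
    · by_cases hd : PySem.Chars.isdigit c = true
      · simp [hd, ih hm]
      · simp only [Bool.not_eq_true] at hd
        simp [hd, pfExpPart_colon h]

theorem pfMant_colon {l : List Char} (h : ':' ∈ l) : ∀ saw, pfMant l saw = false := by
  induction l with
  | nil => simp at h
  | cons c r ih =>
    intro saw
    unfold pfMant
    rcases List.mem_cons.mp h with rfl | hm
    · simp [pfExpPart_colon h, show PySem.Chars.isdigit ':' = false by decide,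
        show (':' == '.') = false by decide]
    · by_cases hd : PySem.Chars.isdigit c = true
      · simp [hd, ih hm]
      · simp only [Bool.not_eq_true] at hd
        by_cases hdot : (c == '.') = true
        · simp [hd, hdot, pfFrac_colon hm]
        · simp only [Bool.not_eq_true] at hdot
          simp [hd, hdot, pfExpPart_colon h]

theorem pfKw_colon {l : List Char} (h : ':' ∈ l) : pfKw l = false := by
  have hm' : (':' : Char) ∈ l.map PySem.Chars.lowerChar := by
    simpa [show PySem.Chars.lowerChar ':' = ':' by decide] using List.mem_map_of_mem h
  have k : ∀ t : List Char, ':' ∉ t → (l.map PySem.Chars.lowerChar == t) = false := by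
    intro t ht
    rw [beq_eq_false_iff_ne]
    intro he
    rw [he] at hm'
    exact ht hm'
  unfold pfKw
  rw [k _ (by decide), k _ (by decide), k _ (by decide)]
  simp

theorem pfBody_colon {l : List Char} (h : ':' ∈ l) : pfBody l = false := by
  unfold pfBody
  simp [pfKw_colon h, pfMant_colon h]

theorem pfPlain_colon {l : List Char} (h : ':' ∈ l) : pfPlain l = false := by
  match l with
  | c :: r =>
    unfold pfPlain
    by_cases hc : (c == '+' || c == '-') = true
    · rcases List.mem_cons.mp h with rfl | hm
      · simp at hc
      · simp [hc, pfBody_colon hm]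
    · simp only [Bool.not_eq_true] at hc
      simp [hc, pfBody_colon h]

theorem pyFloatParses_colon {cs : List Char} (h : ':' ∈ cs) : pyFloatParses cs = false := by
  unfold pyFloatParses
  have h1 : ':' ∈ PySem.Chars.strip cs := mem_strip_of_mem h (by decide)
  have h2 : ':' ∈ (PySem.Chars.strip cs).filter (fun c => c ≠ '_') :=
    List.mem_filter.mpr ⟨h1, by decide⟩
  have h3 : pfPlain (List.filter (fun c => !decide (c = '_')) (PySem.Chars.strip cs)) = false :=
    pfPlain_colon (by simpa using h2)
  simp [h3]

theorem is_float_chars_colon {cs : List Char} (h : ':' ∈ cs) : is_float_chars cs = false := by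
  unfold is_float_chars
  have hall : cs.all (fun c => PySem.Chars.isdigit c || c == ',' || c == '.') = false :=
    List.all_eq_false.mpr ⟨':', h, by decide⟩
  simp [pyFloatParses_colon h, hall]

-- the reference split on ':'
def splitC : List Char → List (List Char)
  | [] => [[]]
  | c :: r =>
    if c = ':' then [] :: splitC r
    else
      match splitC r with
      | [] => [[c]]
      | f :: t => (c :: f) :: t

theorem splitC_ne_nil (l : List Char) : splitC l ≠ [] := by
  match l with
  | [] => simp [splitC]
  | c :: r =>
    unfold splitC
    split
    · simp
    · split <;> simp

theorem splitOn_go_eq (fuel : Nat) : ∀ (l cur : List Char) (acc : List (List Char)),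
    l.length < fuel →
    PySem.Chars.splitOn.go [':'] fuel l cur acc =
      acc.reverse ++ (match splitC l with
        | [] => [cur.reverse]
        | f :: t => (cur.reverse ++ f) :: t) := by
  induction fuel with
  | zero => intro l cur acc h; omega
  | succ n ih =>
    intro l cur acc h
    match l with
    | [] =>
      rw [PySem.Chars.splitOn.go]
      · simp [splitC]
      · omega
    | c :: rest =>
      rw [PySem.Chars.splitOn.go]
      by_cases hc : c = ':'
      · subst hc
        have hpre : [':'].isPrefixOf (':' :: rest) = true := by simp [List.isPrefixOf]
        simp only [hpre, if_true]
        rw [show List.drop [':'].length (':' :: rest) = rest from rfl]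
        rw [ih rest [] (cur.reverse :: acc) (by simpa using Nat.lt_of_succ_lt_succ h)]
        have h2 := splitC_ne_nil rest
        simp only [splitC, if_true]
        match hsc : splitC rest with
        | [] => exact absurd hsc h2
        | f :: t => simp
      · have hpre : [':'].isPrefixOf (c :: rest) = false := by
          simp [List.isPrefixOf, Ne.symm hc]
        simp only [hpre, Bool.false_eq_true, if_false]
        rw [ih rest (c :: cur) acc (by simpa using Nat.lt_of_succ_lt_succ h)]
        have h2 := splitC_ne_nil rest
        simp only [splitC, hc, if_false]
        match hsc : splitC rest with
        | [] => exact absurd hsc h2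
        | f :: t => simp

theorem splitOn_eq_splitC (l : List Char) : PySem.Chars.splitOn l [':'] = splitC l := by
  unfold PySem.Chars.splitOn
  rw [splitOn_go_eq (l.length + 1) l [] [] (by omega)]
  have h2 := splitC_ne_nil l
  match hsc : splitC l with
  | [] => exact absurd hsc h2
  | f :: t => simp

theorem splitC_colon {l : List Char} (h : ':' ∈ l) :
    ∃ f t, splitC l = f :: t ∧ t ≠ [] := by
  induction l with
  | nil => simp at h
  | cons c r ih =>
    by_cases hc : c = ':'
    · subst hc
      exact ⟨[], splitC r, by simp [splitC], splitC_ne_nil r⟩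
    · rcases List.mem_cons.mp h with rfl | hm
      · exact absurd rfl hc
      · obtain ⟨f, t, hft, ht⟩ := ih hm
        refine ⟨c :: f, t, ?_, ht⟩
        simp only [splitC, hc, if_false, hft]

-- valid segment: nonempty, first char alpha, rest alnum
def validSeg : List Char → Bool
  | [] => false
  | c :: r => PySem.Chars.isalpha c && r.all PySem.Chars.isalnum

theorem aWords_eq_all (ws : List (List Char)) : aWords ws = ws.all validSeg := by
  induction ws with
  | nil => simp [aWords]
  | cons w ws ih =>
    rw [List.all_cons, ← ih]
    have hstep : aWords (w :: ws) =
        ((PySem.Chars.strIsalnum w &&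
          (match PySem.List.pyGet? w 0 with
           | some c => PySem.Chars.isalpha c
           | none => false)) && aWords ws) := by
      rw [aWords]
      by_cases ha : PySem.Chars.strIsalnum w = true
      · by_cases hb : (match PySem.List.pyGet? w 0 with
                       | some c => PySem.Chars.isalpha c
                       | none => false) = true
        · simp [ha, hb]
        · simp only [Bool.not_eq_true] at hb
          simp [ha, hb]
      · simp only [Bool.not_eq_true] at ha
        simp [ha]
    rw [hstep]
    congr 1
    match w with
    | [] => simp [validSeg, PySem.Chars.strIsalnum]
    | c :: r =>
      rw [PySem.List.pyGet?_zero_cons]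
      unfold validSeg PySem.Chars.strIsalnum
      by_cases hb : PySem.Chars.isalpha c = true
      · have : PySem.Chars.isalnum c = true := by
          unfold PySem.Chars.isalnum
          simp [hb]
        simp [hb, this]
      · simp only [Bool.not_eq_true] at hb
        simp [hb]

def contOK (n : Nat) (w : List Char) : Bool :=
  if n = 0 then validSeg w else w.all PySem.Chars.isalnum

theorem bScan_spec (l : List Char) : ∀ seen n,
    bScan l seen n =
      (match splitC l with
       | [] => false
       | f :: t => contOK n f && t.all validSeg && (seen || !t.isEmpty)) := by
  induction l with
  | nil => intro seen n; simp only [bScan, splitC]; cases seen <;> cases n <;> simp [contOK, validSeg]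
  | cons c r ih =>
    intro seen n
    unfold bScan
    by_cases hc : (c == ':') = true
    · rw [beq_iff_eq] at hc
      subst hc
      simp only [beq_self_eq_true, if_true]
      rw [show splitC (':' :: r) = [] :: splitC r by simp [splitC]]
      obtain ⟨f, t, hft⟩ : ∃ f t, splitC r = f :: t := by
        match hsc : splitC r with
        | [] => exact absurd hsc (splitC_ne_nil r)
        | f :: t => exact ⟨f, t, rfl⟩
      by_cases hn : n = 0
      · subst hn
        simp [hft, contOK, validSeg]
      · have hn' : (n == 0) = false := by simp [hn]
        rw [hn', if_neg (by simp)]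
        rw [ih true 0, hft]
        simp [contOK, validSeg, hn]
    · obtain ⟨f, t, hft⟩ : ∃ f t, splitC r = f :: t := by
        match hsc : splitC r with
        | [] => exact absurd hsc (splitC_ne_nil r)
        | f :: t => exact ⟨f, t, rfl⟩
      have hc' : ¬ c = ':' := by simpa using hc
      rw [show splitC (c :: r) = (c :: f) :: t by simp [splitC, hc', hft]]
      simp only [hc, Bool.false_eq_true, if_false]
      by_cases hn : n = 0
      · subst hn
        simp only [beq_self_eq_true, if_true]
        by_cases hb : PySem.Chars.isalpha c = true
        · rw [if_neg (by simp [hb]), ih seen 1, hft]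
          simp [contOK, validSeg, hb]
        · simp only [Bool.not_eq_true] at hb
          rw [if_pos (by simp [hb])]
          simp [contOK, validSeg, hb]
      · have hn' : (n == 0) = false := by simp [hn]
        simp only [hn', Bool.false_eq_true, if_false]
        by_cases hb : PySem.Chars.isalnum c = true
        · rw [if_pos hb, ih seen (n+1), hft]
          simp [contOK, hn, hb]
        · simp only [Bool.not_eq_true] at hb
          rw [if_neg (by simp [hb])]
          simp [contOK, hn, hb]

theorem bScan_no_colon {l : List Char} (h : ':' ∉ l) : ∀ n, bScan l false n = false := by
  induction l with
  | nil => intro n; simp [bScan]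
  | cons c r ih =>
    intro n
    unfold bScan
    have hc : (c == ':') = false := by
      simp only [beq_eq_false_iff_ne]
      intro he
      exact h (he ▸ List.mem_cons_self)
    have hr : ':' ∉ r := fun hm => h (List.mem_cons_of_mem _ hm)
    simp only [hc, Bool.false_eq_true, if_false]
    by_cases hn : (n == 0) = true
    · simp only [hn, if_true]
      split
      · rfl
      · exact ih hr 1
    · simp only [Bool.not_eq_true] at hn
      simp only [hn, Bool.false_eq_true, if_false]
      split
      · exact ih hr (n + 1)
      · rfl

theorem isIn_colon (s : List Char) : PySem.Chars.isIn [':'] s = true ↔ ':' ∈ s := by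
  rw [PySem.Chars.isIn_iff_infix]
  constructor
  · intro hinf
    exact hinf.subset List.mem_cons_self
  · intro hm
    obtain ⟨pre, suf, hps⟩ := List.append_of_mem hm
    exact ⟨pre, suf, by rw [hps]; simp⟩

-- ===== VERDICT (by name: the statement is the Claim_ definition above) =====
theorem is_account_spec : Claim_equal_is_account := by
  intro x _
  unfold Spec_is_account is_account is_account_alt is_str
  by_cases hc : ':' ∈ x.toList
  · -- x contains a colon: is_float is false, both sides reduce to the per-segment check
    have hf := is_float_chars_colon hc
    have hcs : ':' ∈ PySem.Chars.strip x.toList := mem_strip_of_mem hc (by decide)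
    have hne : (PySem.Chars.strip x.toList).isEmpty = false := by
      match hm : PySem.Chars.strip x.toList with
      | [] => rw [hm] at hcs; simp at hcs
      | _ :: _ => simp
    have hin : PySem.Chars.isIn [':'] (PySem.Chars.strip x.toList) = true :=
      (isIn_colon _).mpr hcs
    simp only [hf, Bool.not_false, Bool.not_true, Bool.false_eq_true, if_false, hne, hin]
    rw [splitOn_eq_splitC, aWords_eq_all, bScan_spec]
    obtain ⟨f, t, hft, ht⟩ := splitC_colon hcs
    have htne : t.isEmpty = false := by
      match t, ht with
      | _ :: _, _ => simp
    rw [hft]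
    simp [contOK, htne]
  · -- no colon anywhere: both sides are false
    have hcs : ':' ∉ PySem.Chars.strip x.toList := fun hm => hc (strip_subset hm)
    rw [bScan_no_colon hcs 0]
    by_cases hfl : is_float_chars x.toList = true
    · simp [hfl]
    · simp only [Bool.not_eq_true] at hfl
      have hin : PySem.Chars.isIn [':'] (PySem.Chars.strip x.toList) = false := by
        rcases Bool.eq_false_or_eq_true (PySem.Chars.isIn [':'] (PySem.Chars.strip x.toList))
          with h' | h'
        · exact absurd ((isIn_colon _).mp h') hcs
        · exact h'
      by_cases hni : (PySem.Chars.strip x.toList).isEmpty = true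
      · simp [hfl, hni]
      · simp only [Bool.not_eq_true] at hni
        simp [hfl, hni, hin]
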